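-- pv_equiv track=rewrite | github.com/alby69/py2c64 | V2/main.py | _remove_dead_loads
-- ===== SOURCE A (Python) =====
-- from typing import List, Dict, Any, Optional, Set
--
-- def _remove_dead_loads(lines: List[str]) -> List[str]:
--     """Rimuove LDA/STA ridondanti"""
--     result = []
--     i = 0
--
--     while i < len(lines):
--         line = lines[i].strip()
--
--         # Cerca pattern: LDA addr; STA addr (stesso indirizzo)
--         if (line.startswith("LDA ") and
--             i + 1 < len(lines) and
--             lines[i + 1].strip() == f"STA {line[4:]}"):
--             # Salta entrambe le istruzioni
--             i += 2
--             continue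
--
--         result.append(lines[i])
--         i += 1
--
--     return result
-- ===== SOURCE B (Python) =====
-- def _remove_dead_loads(lines):
--     """Rimuove LDA/STA ridondanti"""
--     dead = set()
--     for i in range(len(lines) - 1):
--         a = lines[i].strip()
--         if a.startswith("LDA ") and lines[i + 1].strip() == "STA " + a[4:]:
--             dead.add(i)
--             dead.add(i + 1)
--     return [line for i, line in enumerate(lines) if i not in dead]
-- ===== Notes on version B (the rewrite author's own statement) =====
-- stated objective: alternative
-- what changed: Replaces A's single emit-as-you-go while loop (with a two-step skip on a match) by a two-pass decomposition: one scan over adjacent index pairs collecting dead indices into a set, then a list-comprehension filter over enumerate(lines) keeping original lines whose index is not dead; equivalent because a line stripped to 'STA addr' can never start with 'LDA ', so matches never overlap and the skip is redundant.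
import Mathlib
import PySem

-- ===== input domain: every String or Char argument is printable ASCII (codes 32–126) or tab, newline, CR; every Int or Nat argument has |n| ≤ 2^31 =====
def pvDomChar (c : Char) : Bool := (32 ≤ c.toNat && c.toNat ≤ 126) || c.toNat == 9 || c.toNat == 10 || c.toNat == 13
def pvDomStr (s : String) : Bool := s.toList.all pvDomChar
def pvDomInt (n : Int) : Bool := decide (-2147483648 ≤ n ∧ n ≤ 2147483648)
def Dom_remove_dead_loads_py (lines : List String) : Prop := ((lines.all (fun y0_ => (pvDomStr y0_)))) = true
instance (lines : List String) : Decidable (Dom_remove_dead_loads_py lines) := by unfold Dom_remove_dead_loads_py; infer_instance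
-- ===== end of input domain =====

-- B replaces A's emit-as-you-go while-loop (with its two-step skip) by a two-pass decomposition:
-- collect the dead index pairs into a set, then filter the enumerated lines (objective: alternative).

-- ===== PORT A =====
def pvA_loop (lines : List String) (i : Nat) (result : List String) : List String :=
  if h : i < lines.length then
    let line := PySem.Str.strip lines[i]
    if PySem.Str.startswith line "LDA " = true then
      if h2 : i + 1 < lines.length then
        if PySem.Str.strip lines[i + 1] = "STA " ++ PySem.Str.slice line (some 4) none then
          pvA_loop lines (i + 2) result
        else
          pvA_loop lines (i + 1) (result ++ [lines[i]])
      else pvA_loop lines (i + 1) (result ++ [lines[i]])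
    else pvA_loop lines (i + 1) (result ++ [lines[i]])
  else result
termination_by lines.length - i

def remove_dead_loads_py (lines : List String) : List String :=
  pvA_loop lines 0 []

-- ===== PORT B =====
-- the loop-body condition of B's first pass (the 'if' inside 'for i in range(len(lines) - 1)')
def pvB_cond (lines : List String) (i : Int) : Bool :=
  let a := PySem.Str.strip (PySem.List.pyGetD lines i "")
  PySem.Str.startswith a "LDA " &&
    (PySem.Str.strip (PySem.List.pyGetD lines (i + 1) "") == "STA " ++ PySem.Str.slice a (some 4) none)

def remove_dead_loads_py_alt (lines : List String) : List String :=
  let dead : PySem.Set Int :=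
    (PySem.List.pyRange 0 ((lines.length : Int) - 1) 1).foldl
      (fun dead i => if pvB_cond lines i then PySem.Set.add (PySem.Set.add dead i) (i + 1) else dead)
      PySem.Set.empty
  ((PySem.List.enumerate lines 0).filter (fun p => !(PySem.Set.contains dead p.1))).map (fun p => p.2)

-- ===== PRECONDITION & SPEC =====
def Spec_remove_dead_loads_py (lines : List String) (out : List String) : Prop := out = remove_dead_loads_py_alt lines
instance (lines : List String) (out : List String) : Decidable (Spec_remove_dead_loads_py lines out) := by unfold Spec_remove_dead_loads_py; infer_instance

-- ===== CLAIM (what is proved, stated in full; the proofs are below) =====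
def Claim_equal_remove_dead_loads_py : Prop := ∀ (lines : List String), Dom_remove_dead_loads_py lines → Spec_remove_dead_loads_py lines (remove_dead_loads_py lines)

-- ===== LEMMAS AND PROOFS =====

-- matchAt lines i: the redundant LDA/STA pattern holds at positions i, i+1
def matchAt (lines : List String) (i : Nat) : Bool :=
  match lines[i]?, lines[i + 1]? with
  | some a, some b =>
      let s := PySem.Str.strip a
      PySem.Str.startswith s "LDA " && (PySem.Str.strip b == "STA " ++ PySem.Str.slice s (some 4) none)
  | _, _ => false

-- an index is dead iff it is the first or second element of a matching pair
def deadB (lines : List String) (j : Nat) : Bool :=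
  matchAt lines j || (decide (0 < j) && matchAt lines (j - 1))

lemma sta_not_lda (x : String) : PySem.Str.startswith ("STA " ++ x) "LDA " = false := by
  rw [Bool.eq_false_iff]
  intro hc
  rw [PySem.Str.startswith_eq, PySem.Chars.startswith_iff] at hc
  simp [String.toList_append] at hc

-- overlapping matches are impossible: a line stripped to "STA …" cannot start with "LDA "
lemma no_overlap (lines : List String) (i : Nat) (h : matchAt lines i = true) :
    matchAt lines (i + 1) = false := by
  cases ha : lines[i]? with
  | none => simp [matchAt, ha] at h
  | some a =>
    cases hb : lines[i + 1]? with
    | none => simp [matchAt, ha, hb] at h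
    | some b =>
      simp only [matchAt, ha, hb, Bool.and_eq_true, beq_iff_eq] at h
      obtain ⟨-, h2⟩ := h
      cases hc : lines[i + 1 + 1]? with
      | none => simp [matchAt, hc]
      | some c =>
        simp only [matchAt, hb, hc, h2]
        rw [sta_not_lda]
        simp

lemma pvB_cond_eq (lines : List String) (k : Nat) (hk : k + 1 < lines.length) :
    pvB_cond lines (k : Int) = matchAt lines k := by
  have hk0 : k < lines.length := Nat.lt_of_succ_lt hk
  have h1 : ((k : Int) + 1) = ((k + 1 : Nat) : Int) := by push_cast; ring
  simp only [pvB_cond, matchAt, h1, PySem.List.pyGetD_natCast,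
    List.getD_eq_getElem?_getD, List.getElem?_eq_getElem hk0, List.getElem?_eq_getElem hk,
    Option.getD_some]

lemma mem_fold_dead (c : Int → Bool) (l : List Int) (s0 : PySem.Set Int) (x : Int) :
    x ∈ l.foldl (fun s i => if c i then PySem.Set.add (PySem.Set.add s i) (i + 1) else s) s0 ↔
      x ∈ s0 ∨ ∃ i ∈ l, c i = true ∧ (x = i ∨ x = i + 1) := by
  induction l generalizing s0 with
  | nil => simp
  | cons hd tl ih =>
    simp only [List.foldl_cons, ih]
    by_cases hc : c hd = true
    · simp [hc, PySem.Set.mem_add, or_assoc]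
    · simp [hc]

lemma matchAt_lt (lines : List String) (j : Nat) (h : matchAt lines j = true) :
    j + 1 < lines.length := by
  by_contra hge
  have hn : lines[j + 1]? = none := List.getElem?_eq_none (by omega)
  rw [matchAt, hn] at h
  cases lines[j]? <;> simp at h

-- B's dead set contains exactly the (casts of) dead indices
lemma contains_deadSet (lines : List String) (k : Nat) (hk : k < lines.length) :
    PySem.Set.contains
      ((PySem.List.pyRange 0 ((lines.length : Int) - 1) 1).foldl
        (fun dead i => if pvB_cond lines i then PySem.Set.add (PySem.Set.add dead i) (i + 1) else dead)
        PySem.Set.empty) (k : Int) = deadB lines k := by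
  rw [Bool.eq_iff_iff]
  have hmem : ∀ (s : PySem.Set Int) (x : Int), PySem.Set.contains s x = true ↔ x ∈ s := by
    intro s x; simp [PySem.Set.contains]
  rw [hmem, mem_fold_dead]
  simp only [PySem.Set.empty, List.not_mem_nil, false_or, PySem.List.mem_pyRange_one]
  constructor
  · rintro ⟨i, ⟨hi0, hin⟩, hcond, hx⟩
    lift i to ℕ using hi0 with m
    have hm : m + 1 < lines.length := by omega
    rw [pvB_cond_eq lines m hm] at hcond
    rcases hx with h | h
    · have : k = m := by omega
      subst this
      simp [deadB, hcond]
    · have : k = m + 1 := by omega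
      subst this
      simp [deadB, hcond]
  · intro hd
    rw [deadB, Bool.or_eq_true, Bool.and_eq_true, decide_eq_true_iff] at hd
    rcases hd with hm | ⟨hk0, hm⟩
    · have hlt := matchAt_lt lines k hm
      exact ⟨(k : Int), ⟨by omega, by omega⟩, by rw [pvB_cond_eq lines k hlt]; exact hm, Or.inl rfl⟩
    · have hlt := matchAt_lt lines (k - 1) hm
      exact ⟨((k - 1 : Nat) : Int), ⟨by omega, by omega⟩,
        by rw [pvB_cond_eq lines (k - 1) hlt]; exact hm, Or.inr (by omega)⟩

-- the common specification: the lines at indices from i on, dead indices filtered out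
def spec (lines : List String) (i : Nat) : List String :=
  ((List.range' i (lines.length - i)).filter (fun k => !deadB lines k)).map
    (fun k => lines.getD k "")

lemma spec_nil (lines : List String) (i : Nat) (h : lines.length ≤ i) : spec lines i = [] := by
  unfold spec
  rw [Nat.sub_eq_zero_of_le h]
  rfl

lemma spec_cons_dead (lines : List String) (i : Nat) (h2 : i + 1 < lines.length)
    (hm : matchAt lines i = true) : spec lines i = spec lines (i + 2) := by
  unfold spec
  rw [show lines.length - i = (lines.length - (i + 2)) + 1 + 1 by omega, List.range'_succ,
    List.range'_succ]
  have hd1 : deadB lines i = true := by simp [deadB, hm]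
  have hd2 : deadB lines (i + 1) = true := by simp [deadB, hm]
  simp [hd1, hd2]

lemma spec_cons_keep (lines : List String) (i : Nat) (h : i < lines.length)
    (hm : matchAt lines i = false) (hinv : i = 0 ∨ matchAt lines (i - 1) = false) :
    spec lines i = lines[i] :: spec lines (i + 1) := by
  have hdead : deadB lines i = false := by
    rcases hinv with h0 | hprev
    · subst h0; simp [deadB, hm]
    · simp [deadB, hm, hprev]
  unfold spec
  rw [show lines.length - i = (lines.length - (i + 1)) + 1 by omega, List.range'_succ]
  simp [hdead, List.getElem?_eq_getElem h]

lemma A_loop_aux (lines : List String) (fuel : Nat) :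
    ∀ i result, lines.length - i ≤ fuel →
      (i = 0 ∨ matchAt lines (i - 1) = false) →
      pvA_loop lines i result = result ++ spec lines i := by
  induction fuel with
  | zero =>
    intro i result hf hinv
    rw [pvA_loop, dif_neg (by omega), spec_nil lines i (by omega), List.append_nil]
  | succ fuel ih =>
    intro i result hf hinv
    by_cases h : i < lines.length
    · by_cases hm : matchAt lines i = true
      · have h2 : i + 1 < lines.length := matchAt_lt lines i hm
        have hparts : PySem.Str.startswith (PySem.Str.strip lines[i]) "LDA " = true ∧
            PySem.Str.strip lines[i + 1] =
              "STA " ++ PySem.Str.slice (PySem.Str.strip lines[i]) (some 4) none := by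
          rw [matchAt, List.getElem?_eq_getElem h, List.getElem?_eq_getElem h2] at hm
          simpa using hm
        rw [pvA_loop, dif_pos h]
        simp only [hparts.1, if_true, dif_pos h2, if_pos hparts.2]
        rw [ih (i + 2) result (by omega)
          (Or.inr (by simpa using no_overlap lines i hm)), spec_cons_dead lines i h2 hm]
      · have hm' : matchAt lines i = false := by simpa using hm
        have hstep : pvA_loop lines (i + 1) (result ++ [lines[i]]) = result ++ spec lines i := by
          rw [ih (i + 1) (result ++ [lines[i]]) (by omega)
            (Or.inr (by simpa using hm')), spec_cons_keep lines i h hm' hinv]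
          simp
        rw [pvA_loop, dif_pos h]
        by_cases hsw : PySem.Str.startswith (PySem.Str.strip lines[i]) "LDA " = true
        · simp only [hsw, if_true]
          by_cases h2 : i + 1 < lines.length
          · rw [dif_pos h2, if_neg ?_]
            · exact hstep
            · intro he
              rw [matchAt, List.getElem?_eq_getElem h, List.getElem?_eq_getElem h2] at hm
              exact hm (by simp [he]; simpa using hsw)
          · rw [dif_neg h2]; exact hstep
        · rw [if_neg hsw]; exact hstep
    · rw [pvA_loop, dif_neg h, spec_nil lines i (by omega), List.append_nil]

lemma enum_filter_map (xs : List String) (f : Int → Bool) :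
    ∀ s : Int, ((PySem.List.enumerate xs s).filter (fun p => f p.1)).map (fun p => p.2)
      = ((List.range xs.length).filter (fun (k : Nat) => f (s + (k : Int)))).map
          (fun k => xs.getD k "") := by
  induction xs with
  | nil => intro s; simp
  | cons x xs ih =>
    intro s
    rw [PySem.List.enumerate_cons, List.length_cons, List.range_succ_eq_map, List.filter_cons]
    by_cases hf : f s = true
    · simp [hf, ih (s + 1), List.filter_map, Function.comp_def, Nat.succ_eq_add_one,
        add_comm, add_left_comm]
    · simp only [Bool.not_eq_true] at hf
      simp [hf, ih (s + 1), List.filter_map, Function.comp_def, Nat.succ_eq_add_one,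
        add_comm, add_left_comm]

lemma B_eq (lines : List String) :
    remove_dead_loads_py_alt lines = spec lines 0 := by
  simp only [remove_dead_loads_py_alt]
  have h := enum_filter_map lines
    (fun j => !(PySem.Set.contains
      ((PySem.List.pyRange 0 ((lines.length : Int) - 1) 1).foldl
        (fun dead i => if pvB_cond lines i then PySem.Set.add (PySem.Set.add dead i) (i + 1) else dead)
        PySem.Set.empty) j)) 0
  simp only at h
  rw [h]
  unfold spec
  rw [Nat.sub_zero, ← List.range_eq_range']
  rw [List.filter_congr (fun k hk => ?_)]
  rw [List.mem_range] at hk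
  rw [zero_add, contains_deadSet lines k hk]

-- ===== VERDICT (by name: the statement is the Claim_ definition above) =====
theorem remove_dead_loads_py_spec : Claim_equal_remove_dead_loads_py := by
  intro lines _
  unfold Spec_remove_dead_loads_py remove_dead_loads_py
  rw [B_eq, A_loop_aux lines lines.length 0 [] (by omega) (Or.inl rfl), List.nil_append]
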